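-- pv_equiv track=rewrite | github.com/An931/pyChess | game.py | get_pathway_cells
-- ===== SOURCE A (Python) =====
-- def get_pathway_cells(from_pos, to_pos):
-- 	""" Возвращает список id клеток, которые находятся на траектории предполагаемого движения
-- 			Если траектория - прямая или диагональ, то возвращает список клеток между from и to
-- 			Иначе пустой список (в случае хода коня или некорректного хода) """
--
-- 	def get_row(from_pos, to_pos):
-- 		num = from_pos[1]
-- 		min_let = ord(min(from_pos[0], to_pos[0]))
-- 		max_let = ord(max(from_pos[0], to_pos[0]))
-- 		return [chr(x)+num for x in range(min_let+1, max_let)]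
--
-- 	def get_column(from_pos, to_pos):
-- 		letter = from_pos[0]
-- 		min_num = int(min(from_pos[1], to_pos[1]))
-- 		max_num = int(max(from_pos[1], to_pos[1]))
-- 		return [letter+str(x) for x in range(min_num+1, max_num)]
--
-- 	def get_diagonal(from_pos, to_pos):
-- 		delta = abs(int(from_pos[1]) - int(to_pos[1]))
-- 		min_let = ord(min(from_pos[0], to_pos[0]))
-- 		cells = []
-- 		if (ord(from_pos[0]) - ord(to_pos[0])) * (int(from_pos[1]) - int(to_pos[1])) > 0:
-- 			#   то есть одного знака -- диагональ лев.низ-прав.верх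
-- 			min_num = int(min(from_pos[1], to_pos[1]))
-- 			for i in range(1, delta):
-- 				l = min_let + i
-- 				n = min_num + i
-- 				cells.append(chr(l)+str(n))
-- 		else: # диагональ прав.низ - лев.верх
-- 			max_num = int(max(from_pos[1], to_pos[1]))
-- 			for i in range(1, delta):
-- 				l = min_let + i
-- 				n = max_num - i
-- 				cells.append(chr(l) + str(n))
-- 		return cells
--
-- 	dx = ord(from_pos[0]) - ord(to_pos[0])
-- 	dy = int(from_pos[1]) - int(to_pos[1])
-- 	if abs(dx) == abs(dy):
-- 		return get_diagonal(from_pos, to_pos)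
-- 	if dx == 0 and dy != 0:
-- 		return get_column(from_pos, to_pos)
-- 	if dx != 0 and dy == 0:
-- 		return get_row(from_pos, to_pos)
-- 	return []
-- ===== SOURCE B (Python) =====
-- def get_pathway_cells(from_pos, to_pos):
--     """Same result as A: the cells strictly between the endpoints on a shared
--     row, column or diagonal (always listed by ascending letter; by ascending
--     number for a column), else [].  Instead of walking the path, B scans the
--     bounding rectangle of the two endpoints and keeps every interior cell that
--     is collinear with them (a geometric filter rather than a step-by-step walk)."""
--     fl, fn = ord(from_pos[0]), int(from_pos[1])
--     tl, tn = ord(to_pos[0]), int(to_pos[1])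
--     dl, dn = tl - fl, tn - fn
--     if not (abs(dl) == abs(dn) or dl == 0 or dn == 0):
--         return []
--     cells = []
--     for l in range(min(fl, tl), max(fl, tl) + 1):
--         for n in range(min(fn, tn), max(fn, tn) + 1):
--             if (l - fl) * dn == (n - fn) * dl and (l, n) != (fl, fn) and (l, n) != (tl, tn):
--                 cells.append(chr(l) + str(n))
--     return cells
-- ===== Notes on version B (the rewrite author's own statement) =====
-- stated objective: alternative
-- what changed: A walks the path cell-by-cell via three per-shape helpers (row/column/diagonal loops stepping along the line); B never walks: it scans the bounding rectangle of the two endpoints and keeps each interior cell satisfying the collinearity cross-product test (l-fl)*dn == (n-fn)*dl.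
import Mathlib
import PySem

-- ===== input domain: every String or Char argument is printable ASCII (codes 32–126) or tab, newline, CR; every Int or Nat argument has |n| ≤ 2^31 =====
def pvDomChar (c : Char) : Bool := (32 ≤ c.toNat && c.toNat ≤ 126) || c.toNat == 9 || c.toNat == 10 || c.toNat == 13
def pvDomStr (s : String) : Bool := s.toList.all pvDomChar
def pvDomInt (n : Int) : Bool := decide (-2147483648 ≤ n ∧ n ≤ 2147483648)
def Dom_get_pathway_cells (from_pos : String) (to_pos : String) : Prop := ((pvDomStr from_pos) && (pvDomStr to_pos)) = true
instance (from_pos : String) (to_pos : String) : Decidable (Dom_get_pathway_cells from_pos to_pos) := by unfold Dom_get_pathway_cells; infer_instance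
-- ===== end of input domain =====

-- B replaces A's cell-by-cell walk (three per-shape helpers stepping along the line)
-- by a scan of the bounding rectangle of the two endpoints, keeping each interior
-- cell that passes the collinearity cross-product test; objective: alternative
-- algorithm (no speed claim).

-- ===== PORT A =====
-- A-side helpers: the nested functions get_row / get_column / get_diagonal, with the
-- four accessed characters and the two already-parsed second digits passed in.
def pvA_row (f0 f1 t0 : Char) : List String :=
  let num := f1
  let minLet : Int := ((min f0 t0).toNat : Int)
  let maxLet : Int := ((max f0 t0).toNat : Int)
  (PySem.List.pyRange (minLet + 1) maxLet 1).map
    (fun x => String.ofList [Char.ofNat x.toNat, num])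

def pvA_column (f0 f1 t1 : Char) : List String :=
  let letter := f0
  -- int(min(from_pos[1], to_pos[1])) / int(max(...)); none = ValueError, excluded by Pre_
  match PySem.Int.ofChars? [min f1 t1], PySem.Int.ofChars? [max f1 t1] with
  | some minNum, some maxNum =>
      (PySem.List.pyRange (minNum + 1) maxNum 1).map
        (fun x => String.ofList (letter :: PySem.Int.toChars x))
  | _, _ => []

def pvA_diag (f0 f1 t0 t1 : Char) (fn tn : Int) : List String :=
  let delta : Int := ((fn - tn).natAbs : Int)
  let minLet : Int := ((min f0 t0).toNat : Int)
  if ((f0.toNat : Int) - (t0.toNat : Int)) * (fn - tn) > 0 then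
    match PySem.Int.ofChars? [min f1 t1] with
    | some minNum =>
        (PySem.List.pyRange 1 delta 1).foldl
          (fun cells i =>
            cells ++ [String.ofList (Char.ofNat (minLet + i).toNat :: PySem.Int.toChars (minNum + i))]) []
    | none => []
  else
    match PySem.Int.ofChars? [max f1 t1] with
    | some maxNum =>
        (PySem.List.pyRange 1 delta 1).foldl
          (fun cells i =>
            cells ++ [String.ofList (Char.ofNat (minLet + i).toNat :: PySem.Int.toChars (maxNum - i))]) []
    | none => []

def get_pathway_cells (from_pos : String) (to_pos : String) : List String :=
  match PySem.Str.pyGet? from_pos 0, PySem.Str.pyGet? from_pos 1,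
        PySem.Str.pyGet? to_pos 0, PySem.Str.pyGet? to_pos 1 with
  | some f0, some f1, some t0, some t1 =>
    match PySem.Int.ofChars? [f1], PySem.Int.ofChars? [t1] with
    | some fn, some tn =>
      let dx : Int := (f0.toNat : Int) - (t0.toNat : Int)
      let dy : Int := fn - tn
      if dx.natAbs = dy.natAbs then pvA_diag f0 f1 t0 t1 fn tn
      else if dx = 0 ∧ dy ≠ 0 then pvA_column f0 f1 t1
      else if dx ≠ 0 ∧ dy = 0 then pvA_row f0 f1 t0
      else []
    | _, _ => []  -- int() raised: excluded by Pre_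
  | _, _, _, _ => []  -- IndexError: excluded by Pre_

-- ===== PORT B =====
-- B: reject non-aligned moves, then scan the bounding rectangle and keep each
-- collinear cell that is not an endpoint (nested loops, ascending letter then number).
def get_pathway_cells_alt (from_pos : String) (to_pos : String) : List String :=
  match PySem.Str.pyGet? from_pos 0, PySem.Str.pyGet? from_pos 1,
        PySem.Str.pyGet? to_pos 0, PySem.Str.pyGet? to_pos 1 with
  | some fc, some fd, some tc, some td =>
    match PySem.Int.ofChars? [fd], PySem.Int.ofChars? [td] with
    | some fn, some tn =>
      let fl : Int := (fc.toNat : Int)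
      let tl : Int := (tc.toNat : Int)
      let dl : Int := tl - fl
      let dn : Int := tn - fn
      if ¬(dl.natAbs = dn.natAbs ∨ dl = 0 ∨ dn = 0) then []
      else
        (PySem.List.pyRange (min fl tl) (max fl tl + 1) 1).foldl
          (fun cells l =>
            (PySem.List.pyRange (min fn tn) (max fn tn + 1) 1).foldl
              (fun cells2 n =>
                if (l - fl) * dn = (n - fn) * dl ∧ ¬(l = fl ∧ n = fn) ∧ ¬(l = tl ∧ n = tn)
                then cells2 ++ [String.ofList (Char.ofNat l.toNat :: PySem.Int.toChars n)]
                else cells2)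
              cells)
          []
    | _, _ => []
  | _, _, _, _ => []

-- ===== PRECONDITION & SPEC =====
-- Pre_ excludes exactly the inputs on which A raises: a position shorter than 2
-- characters (IndexError) or whose second character is not an ASCII digit (ValueError
-- from int()); A returns normally on every other input of the domain.
def Pre_get_pathway_cells (from_pos : String) (to_pos : String) : Prop :=
  2 ≤ from_pos.toList.length ∧ 2 ≤ to_pos.toList.length ∧
  (48 ≤ (from_pos.toList.getD 1 ' ').toNat ∧ (from_pos.toList.getD 1 ' ').toNat ≤ 57) ∧
  (48 ≤ (to_pos.toList.getD 1 ' ').toNat ∧ (to_pos.toList.getD 1 ' ').toNat ≤ 57)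
instance (from_pos : String) (to_pos : String) : Decidable (Pre_get_pathway_cells from_pos to_pos) := by
  unfold Pre_get_pathway_cells; infer_instance
def pvWitness_get_pathway_cells : String × String := ("a1", "d4")

def Spec_get_pathway_cells (from_pos : String) (to_pos : String) (out : List String) : Prop := out = get_pathway_cells_alt from_pos to_pos
instance (from_pos : String) (to_pos : String) (out : List String) : Decidable (Spec_get_pathway_cells from_pos to_pos out) := by unfold Spec_get_pathway_cells; infer_instance

-- ===== CLAIM (what is proved, stated in full; the proofs are below) =====
def Claim_equal_get_pathway_cells : Prop := ∀ (from_pos : String) (to_pos : String), Dom_get_pathway_cells from_pos to_pos → Pre_get_pathway_cells from_pos to_pos → Spec_get_pathway_cells from_pos to_pos (get_pathway_cells from_pos to_pos)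

-- ===== LEMMAS AND PROOFS =====
theorem pv_digit_ofChars (c : Char) (h1 : 48 ≤ c.toNat) (h2 : c.toNat ≤ 57) :
    PySem.Int.ofChars? [c] = some ((c.toNat : Int) - 48) := by
  have hc : c = Char.ofNat c.toNat := (Char.ofNat_toNat c).symm
  set n := c.toNat with hn
  interval_cases n <;> (rw [hc]; decide)

theorem pv_digit_toChars (c : Char) (h1 : 48 ≤ c.toNat) (h2 : c.toNat ≤ 57) :
    PySem.Int.toChars ((c.toNat : Int) - 48) = [c] := by
  have hc : c = Char.ofNat c.toNat := (Char.ofNat_toNat c).symm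
  set n := c.toNat with hn
  interval_cases n <;> (rw [hc]; decide)

theorem pv_char_le_toNat (c d : Char) (h : c ≤ d) : c.toNat ≤ d.toNat := Fin.mk_le_mk.mp h

theorem pv_min_char_toNat (c d : Char) : ((min c d).toNat : Int) = min (c.toNat : Int) (d.toNat : Int) := by
  rcases le_total c d with h | h
  · rw [min_eq_left h]; have := pv_char_le_toNat c d h; omega
  · rw [min_eq_right h]; have := pv_char_le_toNat d c h; omega

theorem pv_max_char_toNat (c d : Char) : ((max c d).toNat : Int) = max (c.toNat : Int) (d.toNat : Int) := by
  rcases le_total c d with h | h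
  · rw [max_eq_right h]; have := pv_char_le_toNat c d h; omega
  · rw [max_eq_left h]; have := pv_char_le_toNat d c h; omega

theorem pv_ofChars_min (c d : Char) (hc1 : 48 ≤ c.toNat) (hc2 : c.toNat ≤ 57)
    (hd1 : 48 ≤ d.toNat) (hd2 : d.toNat ≤ 57) :
    PySem.Int.ofChars? [min c d] = some (min ((c.toNat : Int) - 48) ((d.toNat : Int) - 48)) := by
  rcases le_total c d with h | h
  · rw [min_eq_left h, pv_digit_ofChars c hc1 hc2]
    have := pv_char_le_toNat c d h; congr 1; omega
  · rw [min_eq_right h, pv_digit_ofChars d hd1 hd2]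
    have := pv_char_le_toNat d c h; congr 1; omega

theorem pv_ofChars_max (c d : Char) (hc1 : 48 ≤ c.toNat) (hc2 : c.toNat ≤ 57)
    (hd1 : 48 ≤ d.toNat) (hd2 : d.toNat ≤ 57) :
    PySem.Int.ofChars? [max c d] = some (max ((c.toNat : Int) - 48) ((d.toNat : Int) - 48)) := by
  rcases le_total c d with h | h
  · rw [max_eq_right h, pv_digit_ofChars d hd1 hd2]
    have := pv_char_le_toNat c d h; congr 1; omega
  · rw [max_eq_left h, pv_digit_ofChars c hc1 hc2]
    have := pv_char_le_toNat d c h; congr 1; omega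

-- two ascending-range maps are equal when the lengths agree and the functions agree
-- at corresponding offsets
theorem pv_pyRange_map_eq (a1 b1 a2 b2 : Int) (g1 g2 : Int → String)
    (hlen : (b1 - a1).toNat = (b2 - a2).toNat)
    (hfun : ∀ k : Nat, k < (b2 - a2).toNat → g1 (a1 + k) = g2 (a2 + k)) :
    (PySem.List.pyRange a1 b1 1).map g1 = (PySem.List.pyRange a2 b2 1).map g2 := by
  rw [PySem.List.pyRange_one, PySem.List.pyRange_one, hlen, List.map_map, List.map_map]
  exact List.map_congr_left (fun k hk => hfun k (List.mem_range.mp hk))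

-- heads/tails of the produced cell strings
theorem pv_char_head (c : Char) (x : Int) (h : x = (c.toNat : Int)) :
    Char.ofNat x.toNat = c := by
  subst h; simp [Char.ofNat_toNat]

theorem pv_digit_tail (c : Char) (h1 : 48 ≤ c.toNat) (h2 : c.toNat ≤ 57) (y : Int)
    (h : y = (c.toNat : Int) - 48) : PySem.Int.toChars y = [c] := by
  subst h; exact pv_digit_toChars c h1 h2

-- a filter over a nat range whose predicate holds only at j
theorem pv_range_filter_unique (k j : Nat) (q : Nat → Bool)
    (hq : ∀ i, i < k → (q i = true ↔ i = j)) :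
    (List.range k).filter q = if j < k then [j] else [] := by
  induction k with
  | zero => simp
  | succ m ih =>
    rw [List.range_succ, List.filter_append]
    rcases Nat.lt_trichotomy j m with h | h | h
    · rw [ih (fun i hi => hq i (by omega)), if_pos h, if_pos (by omega)]
      have : q m = false := by
        by_contra hc
        have := (hq m (by omega)).mp (by revert hc; cases q m <;> simp)
        omega
      simp [this]
    · subst h
      rw [ih (fun i hi => hq i (by omega)), if_neg (by omega), if_pos (by omega)]
      have : q j = true := (hq j (by omega)).mpr rfl
      simp [this]
    · rw [ih (fun i hi => hq i (by omega)), if_neg (by omega), if_neg (by omega)]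
      have : q m = false := by
        by_contra hc
        have := (hq m (by omega)).mp (by revert hc; cases q m <;> simp)
        omega
      simp [this]

-- a filter over an Int range whose (decidable) predicate is 'n = j' on the range
theorem pv_pyRange_filter_unique (c d j : Int) (p : Int → Prop) [DecidablePred p]
    (hp : ∀ n, c ≤ n → n < d → (p n ↔ n = j)) :
    (PySem.List.pyRange c d 1).filter (fun n => decide (p n))
      = if c ≤ j ∧ j < d then [j] else [] := by
  rw [PySem.List.pyRange_one, List.filter_map]
  by_cases hj : c ≤ j ∧ j < d
  · rw [pv_range_filter_unique ((d - c).toNat) (j - c).toNat _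
        (fun i hi => by
          have := hp (c + i) (by omega) (by omega)
          simp only [Function.comp_apply, decide_eq_true_eq, this]
          omega),
      if_pos (by omega), if_pos hj]
    simp only [List.map_cons, List.map_nil]
    congr 1; omega
  · rw [pv_range_filter_unique ((d - c).toNat) ((d - c).toNat) _
        (fun i hi => by
          have := hp (c + i) (by omega) (by omega)
          simp only [Function.comp_apply, decide_eq_true_eq, this]
          omega),
      if_neg (by omega), if_neg hj]
    simp

-- dropping the two endpoints of an ascending closed Int range leaves its interior
theorem pv_pyRange_filter_between (c d : Int) (hcd : c ≤ d) :
    (PySem.List.pyRange c (d + 1) 1).filter (fun n => decide (¬(n = c) ∧ ¬(n = d)))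
      = PySem.List.pyRange (c + 1) d 1 := by
  rw [PySem.List.pyRange_one_cons (by omega)]
  rcases eq_or_lt_of_le hcd with h | h
  · subst h
    simp
  · rw [PySem.List.pyRange_one_succ_right (by omega)]
    simp only [List.filter_cons, List.filter_append]
    rw [List.filter_eq_self.mpr (fun n hn => by
        have := (PySem.List.mem_pyRange_one).mp hn
        simp only [decide_eq_true_eq]
        omega)]
    simp

-- a flatMap over a closed Int range that is empty at both ends and a singleton inside
theorem pv_flatMap_interior (a b : Int) (hab : a ≤ b) (g : Int → List String)
    (cell : Int → String) (hga : g a = []) (hgb : g b = [])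
    (hint : ∀ l, a < l → l < b → g l = [cell l]) :
    (PySem.List.pyRange a (b + 1) 1).flatMap g = (PySem.List.pyRange (a + 1) b 1).map cell := by
  rw [PySem.List.pyRange_one_cons (by omega)]
  rcases eq_or_lt_of_le hab with h | h
  · subst h
    simp [hga]
  · rw [PySem.List.pyRange_one_succ_right (by omega)]
    simp only [List.flatMap_cons, List.flatMap_append, List.flatMap_cons, List.flatMap_nil,
      hga, hgb, List.nil_append, List.append_nil]
    rw [List.flatMap_def, List.map_congr_left (fun l hl => by
        have := (PySem.List.mem_pyRange_one).mp hl
        exact hint l (by omega) (by omega)), ← List.flatMap_def, ← List.map_eq_flatMap]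

-- singleton ascending range
theorem pv_pyRange_singleton (x : Int) : PySem.List.pyRange x (x + 1) 1 = [x] := by
  rw [PySem.List.pyRange_one]
  norm_num

-- cancel a common nonzero right factor
theorem pv_lin_iff (K u v : Int) (hK : K ≠ 0) : u * K = v * K ↔ u = v :=
  mul_left_inj' hK


-- empty ascending range
theorem pv_pyRange_empty (a b : Int) (h : b ≤ a) : PySem.List.pyRange a b 1 = [] := by
  rw [PySem.List.pyRange_one]
  simp [Int.toNat_eq_zero.mpr (by omega : b - a ≤ 0)]

-- a filtered+mapped range is empty when the predicate fails everywhere on it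
theorem pv_filter_map_nil (c d : Int) (p : Int → Prop) [DecidablePred p] (f : Int → String)
    (hp : ∀ n, c ≤ n → n < d → ¬ p n) :
    List.map f (List.filter (fun n => decide (p n)) (PySem.List.pyRange c d 1)) = [] := by
  rw [List.filter_eq_nil_iff.mpr, List.map_nil]
  intro n hn
  have := PySem.List.mem_pyRange_one.mp hn
  simpa using hp n this.1 this.2

-- a filtered+mapped range is one cell when the predicate holds exactly at j
theorem pv_filter_map_single (c d j : Int) (p : Int → Prop) [DecidablePred p] (f : Int → String)
    (hj : c ≤ j ∧ j < d) (hp : ∀ n, c ≤ n → n < d → (p n ↔ n = j)) :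
    List.map f (List.filter (fun n => decide (p n)) (PySem.List.pyRange c d 1)) = [f j] := by
  rw [pv_pyRange_filter_unique c d j p hp, if_pos hj, List.map_singleton]


-- B's rectangle scan on a (proper) diagonal: one interior cell per interior letter
theorem pv_B_diag (F T M N s : Int) (hne : F ≠ T) (hs : s = 1 ∨ s = -1)
    (hslope : N - M = s * (T - F)) :
    List.flatMap
      (fun l =>
        List.map (fun n => String.ofList (Char.ofNat l.toNat :: PySem.Int.toChars n))
          (List.filter
            (fun n =>
              decide ((l - F) * (N - M) = (n - M) * (T - F) ∧
                ¬(l = F ∧ n = M) ∧ ¬(l = T ∧ n = N)))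
            (PySem.List.pyRange (min M N) (max M N + 1) 1)))
      (PySem.List.pyRange (min F T) (max F T + 1) 1)
    = List.map (fun l => String.ofList (Char.ofNat l.toNat :: PySem.Int.toChars (M + s * (l - F))))
        (PySem.List.pyRange (min F T + 1) (max F T) 1) := by
  have hTF : T - F ≠ 0 := by omega
  rcases hs with rfl | rfl
  · rcases lt_or_gt_of_ne hne with hlt | hgt
    · rw [show min F T = F from by omega, show max F T = T from by omega]
      have hMN : M < N := by omega
      refine pv_flatMap_interior F T (by omega) _ _ ?_ ?_ ?_
      · refine pv_filter_map_nil _ _ _ _ ?_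
        rintro n hn1 hn2 ⟨hc, hx, -⟩
        rw [sub_self, zero_mul] at hc
        rcases mul_eq_zero.mp hc.symm with h | h
        · exact hx ⟨rfl, by omega⟩
        · omega
      · refine pv_filter_map_nil _ _ _ _ ?_
        rintro n hn1 hn2 ⟨hc, -, hx⟩
        have h2 : n - M = N - M :=
          (pv_lin_iff (T - F) _ _ hTF).mp (by linear_combination -hc)
        exact hx ⟨rfl, by omega⟩
      · intro l hl1 hl2
        refine pv_filter_map_single _ _ (M + 1 * (l - F)) _ _ ⟨by omega, by omega⟩ ?_
        intro n hn1 hn2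
        constructor
        · rintro ⟨hc, -, -⟩
          have h2 : n - M = l - F :=
            (pv_lin_iff (T - F) _ _ hTF).mp (by linear_combination (l - F) * hslope - hc)
          omega
        · intro h
          exact ⟨by linear_combination (l - F) * hslope - (T - F) * h, by omega, by omega⟩
    · rw [show min F T = T from by omega, show max F T = F from by omega]
      have hMN : N < M := by omega
      refine pv_flatMap_interior T F (by omega) _ _ ?_ ?_ ?_
      · refine pv_filter_map_nil _ _ _ _ ?_
        rintro n hn1 hn2 ⟨hc, -, hx⟩
        have h2 : n - M = N - M :=
          (pv_lin_iff (T - F) _ _ hTF).mp (by linear_combination -hc)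
        exact hx ⟨rfl, by omega⟩
      · refine pv_filter_map_nil _ _ _ _ ?_
        rintro n hn1 hn2 ⟨hc, hx, -⟩
        rw [sub_self, zero_mul] at hc
        rcases mul_eq_zero.mp hc.symm with h | h
        · exact hx ⟨rfl, by omega⟩
        · omega
      · intro l hl1 hl2
        refine pv_filter_map_single _ _ (M + 1 * (l - F)) _ _ ⟨by omega, by omega⟩ ?_
        intro n hn1 hn2
        constructor
        · rintro ⟨hc, -, -⟩
          have h2 : n - M = l - F :=
            (pv_lin_iff (T - F) _ _ hTF).mp (by linear_combination (l - F) * hslope - hc)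
          omega
        · intro h
          exact ⟨by linear_combination (l - F) * hslope - (T - F) * h, by omega, by omega⟩
  · rcases lt_or_gt_of_ne hne with hlt | hgt
    · rw [show min F T = F from by omega, show max F T = T from by omega]
      have hMN : N < M := by omega
      refine pv_flatMap_interior F T (by omega) _ _ ?_ ?_ ?_
      · refine pv_filter_map_nil _ _ _ _ ?_
        rintro n hn1 hn2 ⟨hc, hx, -⟩
        rw [sub_self, zero_mul] at hc
        rcases mul_eq_zero.mp hc.symm with h | h
        · exact hx ⟨rfl, by omega⟩
        · omega
      · refine pv_filter_map_nil _ _ _ _ ?_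
        rintro n hn1 hn2 ⟨hc, -, hx⟩
        have h2 : n - M = N - M :=
          (pv_lin_iff (T - F) _ _ hTF).mp (by linear_combination -hc)
        exact hx ⟨rfl, by omega⟩
      · intro l hl1 hl2
        refine pv_filter_map_single _ _ (M + -1 * (l - F)) _ _ ⟨by omega, by omega⟩ ?_
        intro n hn1 hn2
        constructor
        · rintro ⟨hc, -, -⟩
          have h2 : n - M = -1 * (l - F) :=
            (pv_lin_iff (T - F) _ _ hTF).mp (by linear_combination (l - F) * hslope - hc)
          omega
        · intro h
          exact ⟨by linear_combination (l - F) * hslope - (T - F) * h, by omega, by omega⟩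
    · rw [show min F T = T from by omega, show max F T = F from by omega]
      have hMN : M < N := by omega
      refine pv_flatMap_interior T F (by omega) _ _ ?_ ?_ ?_
      · refine pv_filter_map_nil _ _ _ _ ?_
        rintro n hn1 hn2 ⟨hc, -, hx⟩
        have h2 : n - M = N - M :=
          (pv_lin_iff (T - F) _ _ hTF).mp (by linear_combination -hc)
        exact hx ⟨rfl, by omega⟩
      · refine pv_filter_map_nil _ _ _ _ ?_
        rintro n hn1 hn2 ⟨hc, hx, -⟩
        rw [sub_self, zero_mul] at hc
        rcases mul_eq_zero.mp hc.symm with h | h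
        · exact hx ⟨rfl, by omega⟩
        · omega
      · intro l hl1 hl2
        refine pv_filter_map_single _ _ (M + -1 * (l - F)) _ _ ⟨by omega, by omega⟩ ?_
        intro n hn1 hn2
        constructor
        · rintro ⟨hc, -, -⟩
          have h2 : n - M = -1 * (l - F) :=
            (pv_lin_iff (T - F) _ _ hTF).mp (by linear_combination (l - F) * hslope - hc)
          omega
        · intro h
          exact ⟨by linear_combination (l - F) * hslope - (T - F) * h, by omega, by omega⟩

-- B's rectangle scan on a column: the single letter, interior numbers
theorem pv_B_col (F T M N : Int) (hFT : F = T) (_hMN : M ≠ N) :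
    List.flatMap
      (fun l =>
        List.map (fun n => String.ofList (Char.ofNat l.toNat :: PySem.Int.toChars n))
          (List.filter
            (fun n =>
              decide ((l - F) * (N - M) = (n - M) * (T - F) ∧
                ¬(l = F ∧ n = M) ∧ ¬(l = T ∧ n = N)))
            (PySem.List.pyRange (min M N) (max M N + 1) 1)))
      (PySem.List.pyRange (min F T) (max F T + 1) 1)
    = List.map (fun n => String.ofList (Char.ofNat F.toNat :: PySem.Int.toChars n))
        (PySem.List.pyRange (min M N + 1) (max M N) 1) := by
  subst hFT
  rw [min_self, max_self, pv_pyRange_singleton F]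
  simp only [List.flatMap_cons, List.flatMap_nil, List.append_nil]
  rw [List.filter_congr (q := fun n => decide (¬(n = min M N) ∧ ¬(n = max M N)))
      (fun n hn => by
        have := PySem.List.mem_pyRange_one.mp hn
        simp only [decide_eq_decide]
        constructor
        · rintro ⟨-, h2, h3⟩
          have h2' : n ≠ M := fun he => h2 ⟨by trivial, he⟩
          have h3' : n ≠ N := fun he => h3 ⟨by trivial, he⟩
          exact ⟨by omega, by omega⟩
        · intro h
          have h1 := h.1
          have h2 := h.2
          exact ⟨by ring, fun he => h1 (by omega), fun he => h2 (by omega)⟩),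
    pv_pyRange_filter_between (min M N) (max M N) min_le_max]

-- B's rectangle scan on a row: the single number, interior letters
theorem pv_B_row (F T M N : Int) (hne : F ≠ T) (hMN : M = N) :
    List.flatMap
      (fun l =>
        List.map (fun n => String.ofList (Char.ofNat l.toNat :: PySem.Int.toChars n))
          (List.filter
            (fun n =>
              decide ((l - F) * (N - M) = (n - M) * (T - F) ∧
                ¬(l = F ∧ n = M) ∧ ¬(l = T ∧ n = N)))
            (PySem.List.pyRange (min M N) (max M N + 1) 1)))
      (PySem.List.pyRange (min F T) (max F T + 1) 1)
    = List.map (fun l => String.ofList (Char.ofNat l.toNat :: PySem.Int.toChars M))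
        (PySem.List.pyRange (min F T + 1) (max F T) 1) := by
  subst hMN
  rcases lt_or_gt_of_ne hne with hlt | hgt
  · rw [show min F T = F from by omega, show max F T = T from by omega]
    refine pv_flatMap_interior F T (by omega) _ _ ?_ ?_ ?_
    · refine pv_filter_map_nil _ _ _ _ ?_
      rintro n hn1 hn2 ⟨-, hx, -⟩
      exact hx ⟨rfl, by omega⟩
    · refine pv_filter_map_nil _ _ _ _ ?_
      rintro n hn1 hn2 ⟨-, -, hx⟩
      exact hx ⟨rfl, by omega⟩
    · intro l hl1 hl2
      refine pv_filter_map_single _ _ M _ _ ⟨by omega, by omega⟩ ?_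
      intro n hn1 hn2
      constructor
      · rintro ⟨-, -, -⟩; omega
      · intro h
        exact ⟨by rw [h]; ring, by omega, by omega⟩
  · rw [show min F T = T from by omega, show max F T = F from by omega]
    refine pv_flatMap_interior T F (by omega) _ _ ?_ ?_ ?_
    · refine pv_filter_map_nil _ _ _ _ ?_
      rintro n hn1 hn2 ⟨-, -, hx⟩
      exact hx ⟨rfl, by omega⟩
    · refine pv_filter_map_nil _ _ _ _ ?_
      rintro n hn1 hn2 ⟨-, hx, -⟩
      exact hx ⟨rfl, by omega⟩
    · intro l hl1 hl2
      refine pv_filter_map_single _ _ M _ _ ⟨by omega, by omega⟩ ?_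
      intro n hn1 hn2
      constructor
      · rintro ⟨-, -, -⟩; omega
      · intro h
        exact ⟨by rw [h]; ring, by omega, by omega⟩

-- ===== VERDICT (by name: the statement is the Claim_ definition above) =====
theorem get_pathway_cells_spec : Claim_equal_get_pathway_cells := by
  unfold Claim_equal_get_pathway_cells
  intro f t _hdom hpre
  unfold Spec_get_pathway_cells
  obtain ⟨hf, ht, ⟨hf1, hf2⟩, ⟨ht1, ht2⟩⟩ := hpre
  rcases hfl : f.toList with _ | ⟨f0, fr1⟩
  · rw [hfl] at hf; simp at hf
  rcases fr1 with _ | ⟨f1, fr⟩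
  · rw [hfl] at hf; simp at hf
  rcases htl : t.toList with _ | ⟨t0, tr1⟩
  · rw [htl] at ht; simp at ht
  rcases tr1 with _ | ⟨t1, tr⟩
  · rw [htl] at ht; simp at ht
  rw [hfl] at hf1 hf2
  rw [htl] at ht1 ht2
  simp only [List.getD_cons_succ, List.getD_cons_zero] at hf1 hf2 ht1 ht2
  have hgf0 : PySem.Str.pyGet? f 0 = some f0 := by simp [pysem, hfl]
  have hgf1 : PySem.Str.pyGet? f 1 = some f1 := by simp [pysem, hfl]
  have hgt0 : PySem.Str.pyGet? t 0 = some t0 := by simp [pysem, htl]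
  have hgt1 : PySem.Str.pyGet? t 1 = some t1 := by simp [pysem, htl]
  simp only [get_pathway_cells, get_pathway_cells_alt, hgf0, hgf1, hgt0, hgt1,
      pv_digit_ofChars f1 hf1 hf2, pv_digit_ofChars t1 ht1 ht2]
  clear hgf0 hgf1 hgt0 hgt1 hf ht _hdom hfl htl
  simp only [pvA_diag, pvA_column, pvA_row,
    pv_ofChars_min f1 t1 hf1 hf2 ht1 ht2, pv_ofChars_max f1 t1 hf1 hf2 ht1 ht2,
    pv_min_char_toNat, pv_max_char_toNat,
    PySem.List.foldl_append_ite, PySem.List.foldl_append_eq_flatMap, List.nil_append]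
  simp only [← List.map_eq_flatMap]
  set F : Int := (f0.toNat : Int) with hF
  set T : Int := (t0.toNat : Int) with hT
  set M : Int := (f1.toNat : Int) - 48 with hM
  set N : Int := (t1.toNat : Int) - 48 with hN
  by_cases habs : (F - T).natAbs = (M - N).natAbs
  · rw [if_pos habs, if_neg (not_not_intro (Or.inl (by omega)))]
    by_cases hFT : F = T
    · -- same square: both sides are []
      have hMN : M = N := by omega
      rw [if_neg (show ¬(F - T) * (M - N) > 0 from by
            rw [show F - T = 0 from by omega, zero_mul]; exact lt_irrefl 0),
        show ((M - N).natAbs : Int) = 0 from by omega, pv_pyRange_empty 1 0 (by omega),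
        List.map_nil, show min F T = F from by omega, show max F T = F from by omega,
        pv_pyRange_singleton F]
      simp only [List.flatMap_cons, List.flatMap_nil, List.append_nil]
      exact (pv_filter_map_nil _ _ _ _ (fun n hn1 hn2 => by
        rintro ⟨-, h2, -⟩
        exact h2 ⟨by trivial, by omega⟩)).symm
    · by_cases hpos : (F - T) * (M - N) > 0
      · have hslope : N - M = 1 * (T - F) := by
          rcases mul_pos_iff.mp hpos with ⟨h1, h2⟩ | ⟨h1, h2⟩ <;> omega
        rw [if_pos hpos, pv_B_diag F T M N 1 hFT (Or.inl rfl) hslope]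
        refine pv_pyRange_map_eq _ _ _ _ _ _ (by omega) ?_
        intro k hk
        exact congrArg String.ofList (congrArg₂ List.cons (congrArg Char.ofNat (by omega))
          (congrArg PySem.Int.toChars (by omega)))
      · have hmul : (F - T) * (M - N) < 0 :=
          lt_of_le_of_ne (not_lt.mp hpos) (mul_ne_zero (by omega) (by omega))
        have hslope : N - M = -1 * (T - F) := by
          rcases mul_neg_iff.mp hmul with ⟨h1, h2⟩ | ⟨h1, h2⟩ <;> omega
        rw [if_neg hpos, pv_B_diag F T M N (-1) hFT (Or.inr rfl) hslope]
        refine pv_pyRange_map_eq _ _ _ _ _ _ (by omega) ?_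
        intro k hk
        exact congrArg String.ofList (congrArg₂ List.cons (congrArg Char.ofNat (by omega))
          (congrArg PySem.Int.toChars (by omega)))
  · rw [if_neg habs]
    by_cases hcol : F - T = 0 ∧ M - N ≠ 0
    · rw [if_pos hcol, if_neg (not_not_intro (Or.inr (Or.inl (by omega)))),
        pv_B_col F T M N (by omega) (by omega)]
      exact List.map_congr_left fun n _ =>
        congrArg String.ofList (congrArg₂ List.cons (pv_char_head f0 F hF).symm rfl)
    · by_cases hrow : F - T ≠ 0 ∧ M - N = 0
      · rw [if_neg hcol, if_pos hrow, if_neg (not_not_intro (Or.inr (Or.inr (by omega)))),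
          pv_B_row F T M N (by omega) (by omega)]
        exact List.map_congr_left fun x _ =>
          congrArg String.ofList (by rw [pv_digit_tail f1 hf1 hf2 M hM])
      · rw [if_neg hcol, if_neg hrow, if_pos (show ¬_ from by rintro (h | h | h) <;> omega)]
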